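-- pv_equiv track=rewrite | github.com/griffinhiggins/100AlgorithmsChallenge | ToDo/incrementalBackups/incrementalBackups.py | incrementalBackups
-- ===== SOURCE A (Python) =====
-- def incrementalBackups(n,arr):
--     temp = []
--     for time, file in arr:
--         if time > n:
--             temp.append(file)
--     temp = list(set(temp))
--     temp.sort()
--     return temp
-- ===== SOURCE B (Python) =====
-- def _ins(lst, f):
--     """Insert f into strictly increasing sorted list lst, keeping it sorted and duplicate-free."""
--     if not lst:
--         return [f]
--     if f < lst[0]:
--         return [f] + lst
--     if f == lst[0]:
--         return lst
--     return [lst[0]] + _ins(lst[1:], f)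
--
-- def incrementalBackups(n, arr):
--     out = []
--     for time, file in arr:
--         if time > n:
--             out = _ins(out, file)
--     return out
-- ===== Notes on version B (the rewrite author's own statement) =====
-- stated objective: alternative
-- what changed: B makes one pass over the input, maintaining the result as a strictly increasing (sorted, duplicate-free) list by ordered insertion of each qualifying file, so there is no set, no final sort and no dedup pass at all.
import Mathlib
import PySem

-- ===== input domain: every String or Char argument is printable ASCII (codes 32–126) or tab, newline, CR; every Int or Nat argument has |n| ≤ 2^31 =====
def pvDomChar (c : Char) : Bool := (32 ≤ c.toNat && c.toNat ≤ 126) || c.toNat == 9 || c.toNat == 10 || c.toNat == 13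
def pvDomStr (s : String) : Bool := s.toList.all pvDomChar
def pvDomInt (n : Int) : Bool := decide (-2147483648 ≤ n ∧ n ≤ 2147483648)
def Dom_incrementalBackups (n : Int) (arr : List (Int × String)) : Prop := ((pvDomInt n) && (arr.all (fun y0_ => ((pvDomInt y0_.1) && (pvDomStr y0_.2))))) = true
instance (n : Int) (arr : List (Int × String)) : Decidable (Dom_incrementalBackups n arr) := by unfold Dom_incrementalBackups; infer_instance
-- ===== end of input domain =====

-- B replaces A's filter + set-dedup + sort by ONE pass that keeps a strictly increasing
-- list via ordered insertion of each qualifying file (objective: alternative).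

-- ===== PORT A =====
-- temp = []; for time, file in arr: if time > n: temp.append(file); temp = list(set(temp)); temp.sort()
def incrementalBackups (n : Int) (arr : List (Int × String)) : List String :=
  let temp := arr.foldl (fun acc p => if p.1 > n then acc ++ [p.2] else acc) []
  let temp := PySem.Set.ofList temp
  PySem.List.sorted temp (fun x => x) false

-- ===== PORT B =====
-- _ins: insert f into strictly increasing list, keeping it sorted and duplicate-free
def pvIns (lst : List String) (f : String) : List String :=
  match lst with
  | [] => [f]
  | x :: rest =>
    if f < x then f :: x :: rest
    else if f = x then x :: rest
    else x :: pvIns rest f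

-- out = []; for time, file in arr: if time > n: out = _ins(out, file)
def incrementalBackups_alt (n : Int) (arr : List (Int × String)) : List String :=
  arr.foldl (fun out p => if p.1 > n then pvIns out p.2 else out) []

-- ===== PRECONDITION & SPEC =====
def Spec_incrementalBackups (n : Int) (arr : List (Int × String)) (out : List String) : Prop := out = incrementalBackups_alt n arr
instance (n : Int) (arr : List (Int × String)) (out : List String) : Decidable (Spec_incrementalBackups n arr out) := by unfold Spec_incrementalBackups; infer_instance

-- ===== CLAIM (what is proved, stated in full; the proofs are below) =====
def Claim_equal_incrementalBackups : Prop := ∀ (n : Int) (arr : List (Int × String)), Dom_incrementalBackups n arr → Spec_incrementalBackups n arr (incrementalBackups n arr)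

-- ===== LEMMAS AND PROOFS =====

theorem pv_ins_mem (l : List String) (f x : String) :
    x ∈ pvIns l f ↔ x = f ∨ x ∈ l := by
  induction l with
  | nil => simp [pvIns]
  | cons a t ih =>
    by_cases h1 : f < a
    · simp [pvIns, h1]
    · by_cases h2 : f = a
      · subst h2; simp [pvIns]
      · simp [pvIns, h1, h2, ih]; tauto

theorem pv_ins_pairwise (l : List String) (f : String) (hl : l.Pairwise (· < ·)) :
    (pvIns l f).Pairwise (· < ·) := by
  induction l with
  | nil => simp [pvIns]
  | cons a t ih =>
    obtain ⟨ha, ht⟩ := List.pairwise_cons.1 hl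
    by_cases h1 : f < a
    · have hfa : (f :: a :: t).Pairwise (· < ·) := by
        refine List.pairwise_cons.2 ⟨?_, hl⟩
        intro y hy
        rcases List.mem_cons.1 hy with rfl | hyt
        · exact h1
        · exact lt_trans h1 (ha y hyt)
      simpa [pvIns, h1] using hfa
    · by_cases h2 : f = a
      · simpa [pvIns, h1, h2] using hl
      · have haf : a < f := lt_of_le_of_ne (not_lt.1 h1) (Ne.symm h2)
        have : (a :: pvIns t f).Pairwise (· < ·) := by
          refine List.pairwise_cons.2 ⟨?_, ih ht⟩
          intro y hy
          rcases (pv_ins_mem t f y).1 hy with rfl | hyt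
          · exact haf
          · exact ha y hyt
        simpa [pvIns, h1, h2] using this

-- A's filter loop, from any accumulator, appends the filterMap of the rest.
theorem pv_filter_fold (n : Int) (arr : List (Int × String)) (acc : List String) :
    arr.foldl (fun acc p => if p.1 > n then acc ++ [p.2] else acc) acc
      = acc ++ arr.filterMap (fun p => if p.1 > n then some p.2 else none) := by
  induction arr generalizing acc with
  | nil => simp
  | cons p rest ih =>
    by_cases h : p.1 > n <;> simp [List.foldl_cons, h, ih]

-- Invariant of B's single pass: the accumulator stays strictly increasing and
-- collects exactly the qualifying files.
theorem pv_alt_fold (n : Int) (arr : List (Int × String)) (acc : List String)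
    (hacc : acc.Pairwise (· < ·)) :
    let r := arr.foldl (fun out p => if p.1 > n then pvIns out p.2 else out) acc
    r.Pairwise (· < ·) ∧
      (∀ x, x ∈ r ↔ x ∈ acc ∨ x ∈ arr.filterMap (fun p => if p.1 > n then some p.2 else none)) := by
  induction arr generalizing acc with
  | nil =>
    intro r
    exact ⟨hacc, by simp [r]⟩
  | cons p rest ih =>
    intro r
    by_cases h : p.1 > n
    · have step : r = rest.foldl (fun out p => if p.1 > n then pvIns out p.2 else out) (pvIns acc p.2) := by
        simp [r, List.foldl_cons, h]
      obtain ⟨h1, h2⟩ := ih (pvIns acc p.2) (pv_ins_pairwise acc p.2 hacc)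
      refine ⟨step ▸ h1, ?_⟩
      intro x
      rw [step, h2 x, pv_ins_mem]
      simp [h]
      tauto
    · have step : r = rest.foldl (fun out p => if p.1 > n then pvIns out p.2 else out) acc := by
        simp [r, List.foldl_cons, h]
      obtain ⟨h1, h2⟩ := ih acc hacc
      refine ⟨step ▸ h1, ?_⟩
      intro x
      rw [step, h2 x]
      simp [h]

-- ===== VERDICT (by name: the statement is the Claim_ definition above) =====
theorem incrementalBackups_spec : Claim_equal_incrementalBackups := by
  intro n arr _
  unfold Spec_incrementalBackups incrementalBackups incrementalBackups_alt
  obtain ⟨hpw, hmem⟩ := pv_alt_fold n arr [] (by simp)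
  set r := arr.foldl (fun out p => if p.1 > n then pvIns out p.2 else out) [] with hr
  set temp := arr.foldl (fun acc p => if p.1 > n then acc ++ [p.2] else acc) ([] : List String) with ht
  have htemp : temp = arr.filterMap (fun p => if p.1 > n then some p.2 else none) := by
    simpa using pv_filter_fold n arr []
  have hmemr : ∀ x, x ∈ r ↔ x ∈ temp := by
    intro x; rw [hmem x, htemp]; simp
  have hperm : r.Perm (PySem.Set.ofList temp) := by
    refine (List.perm_ext_iff_of_nodup ?_ ?_).2 ?_
    · exact hpw.imp ne_of_lt
    · exact PySem.Set.nodup_ofList temp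
    · intro x; rw [hmemr x, PySem.Set.mem_ofList]
  exact PySem.List.sorted_eq_of_perm_of_pairwise_lt _ r _ hperm (by simpa using hpw)
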